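-- pv_equiv track=rewrite | github.com/Maks22242/MathModeling | Lab4/main.py | cump_NumbIn
-- ===== SOURCE A (Python) =====
-- def cump_NumbIn(numb, leng):
--     iter = 1
--     nextRandNumb = 0
--     nextNumb = 0
--     st = 0
--     while iter != leng * 2:
--         if iter <= leng:
--             nextNumb = nextNumb + (numb % 10) * pow(10, iter-1)
--         if iter <= leng / 2:
--             iter += 1
--             numb //= 10
--         elif iter > leng / 2 and iter <= (leng + leng / 2):
--             nextRandNumb = nextRandNumb + (numb % 10) * pow(10, st)
--             st += 1
--             numb //= 10
--             iter += 1
--         else: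
--             break
--     return nextNumb,nextRandNumb
-- ===== SOURCE B (Python) =====
-- def cump_NumbIn(numb, leng):
--     if leng <= 0:
--         return 0, 0
--     half = leng // 2
--     return numb % 10 ** leng, (numb // 10 ** half) % 10 ** leng
-- ===== Notes on version B (the rewrite author's own statement) =====
-- stated objective: faster
-- what changed: Replaced the digit-by-digit while-loop with a closed-form pair: the low leng digits numb % 10**leng and the leng digits starting at position leng//2, i.e. (numb // 10**(leng//2)) % 10**leng, with a guard for non-positive leng.
import Mathlib
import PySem

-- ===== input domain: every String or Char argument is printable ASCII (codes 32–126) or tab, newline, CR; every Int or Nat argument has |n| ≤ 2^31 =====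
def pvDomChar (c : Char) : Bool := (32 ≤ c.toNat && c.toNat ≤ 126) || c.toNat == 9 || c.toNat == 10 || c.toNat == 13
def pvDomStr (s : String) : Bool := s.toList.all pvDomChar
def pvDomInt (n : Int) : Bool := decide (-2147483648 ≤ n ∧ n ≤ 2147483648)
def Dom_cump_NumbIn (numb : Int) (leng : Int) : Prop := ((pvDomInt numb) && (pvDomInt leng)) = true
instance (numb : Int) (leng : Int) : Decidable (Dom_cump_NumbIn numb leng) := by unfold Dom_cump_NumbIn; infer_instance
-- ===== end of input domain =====

-- B replaces A's digit-by-digit accumulation loop with the closed-form pair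
-- (numb % 10^leng, (numb // 10^(leng//2)) % 10^leng); objective: simpler.

-- ===== PORT A =====
-- Literal port of A's while-loop; `fuel` only bounds the iteration count (the loop
-- itself exits by `iter == leng*2` or by `break`; the proof shows the fuel suffices).
-- Python's float comparisons `iter <= leng / 2` and `iter <= leng + leng / 2` are
-- ported as `2*iter ≤ leng` and `2*iter ≤ 3*leng`: exact, since for |leng| ≤ 2^31
-- the float `leng / 2` and the sum `leng + leng / 2` are exact and `iter` is an int.
-- `pow(10, iter-1)` / `pow(10, st)` are ported with `.toNat` exponents: `iter ≥ 1`
-- and `st ≥ 0` hold on every reachable state, so this is exact.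
def cumpLoop (fuel : Nat) (numb iter nextNumb nextRandNumb st leng : Int) : Int × Int :=
  match fuel with
  | 0 => (nextNumb, nextRandNumb)
  | f + 1 =>
    if iter = leng * 2 then (nextNumb, nextRandNumb)
    else
      let nextNumb' := if iter ≤ leng then nextNumb + PySem.Int.mod numb 10 * 10 ^ (iter - 1).toNat else nextNumb
      if 2 * iter ≤ leng then
        cumpLoop f (PySem.Int.floordiv numb 10) (iter + 1) nextNumb' nextRandNumb st leng
      else if 2 * iter > leng ∧ 2 * iter ≤ 3 * leng then
        cumpLoop f (PySem.Int.floordiv numb 10) (iter + 1) nextNumb'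
          (nextRandNumb + PySem.Int.mod numb 10 * 10 ^ st.toNat) (st + 1) leng
      else (nextNumb', nextRandNumb)

def cump_NumbIn (numb : Int) (leng : Int) : Int × Int :=
  cumpLoop ((leng * 2).toNat + 1) numb 1 0 0 0 leng

-- ===== PORT B =====
-- `10 ** leng` / `10 ** half` with leng ≥ 1 (so half ≥ 0): `.toNat` exponents are exact.
def cump_NumbIn_alt (numb : Int) (leng : Int) : Int × Int :=
  if leng ≤ 0 then (0, 0)
  else
    (PySem.Int.mod numb (10 ^ leng.toNat),
     PySem.Int.mod (PySem.Int.floordiv numb (10 ^ (PySem.Int.floordiv leng 2).toNat)) (10 ^ leng.toNat))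

-- ===== PRECONDITION & SPEC =====
def Spec_cump_NumbIn (numb : Int) (leng : Int) (out : Int × Int) : Prop := out = cump_NumbIn_alt numb leng
instance (numb : Int) (leng : Int) (out : Int × Int) : Decidable (Spec_cump_NumbIn numb leng out) := by unfold Spec_cump_NumbIn; infer_instance

-- ===== CLAIM (what is proved, stated in full; the proofs are below) =====
def Claim_equal_cump_NumbIn : Prop := ∀ (numb : Int) (leng : Int), Dom_cump_NumbIn numb leng → Spec_cump_NumbIn numb leng (cump_NumbIn numb leng)

-- ===== LEMMAS AND PROOFS =====

lemma pow10_pos (k : Nat) : (0 : Int) < 10 ^ k := by positivity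

lemma pymod_one (v : Int) : PySem.Int.mod v 1 = 0 := by
  rw [PySem.Int.mod_eq_emod_of_pos (by norm_num)]; simp

lemma pyfdiv_one (v : Int) : PySem.Int.floordiv v 1 = v := by
  rw [PySem.Int.floordiv_eq_ediv_of_pos (by norm_num)]; simp

lemma pyfdiv_pyfdiv (v : Int) (k : Nat) :
    PySem.Int.floordiv (PySem.Int.floordiv v 10) (10 ^ k) = PySem.Int.floordiv v (10 ^ (k + 1)) := by
  rw [PySem.Int.floordiv_eq_ediv_of_pos (b := 10) (by norm_num),
      PySem.Int.floordiv_eq_ediv_of_pos (pow10_pos k),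
      PySem.Int.floordiv_eq_ediv_of_pos (pow10_pos (k + 1)),
      Int.ediv_ediv_of_nonneg (by norm_num)]
  ring_nf

lemma pymod_digit (v : Int) (k : Nat) :
    PySem.Int.mod v 10 + 10 * PySem.Int.mod (PySem.Int.floordiv v 10) (10 ^ k)
      = PySem.Int.mod v (10 ^ (k + 1)) := by
  rw [PySem.Int.mod_eq_emod_of_pos (b := 10) (by norm_num),
      PySem.Int.mod_eq_emod_of_pos (pow10_pos k),
      PySem.Int.mod_eq_emod_of_pos (pow10_pos (k + 1)),
      PySem.Int.floordiv_eq_ediv_of_pos (b := 10) (by norm_num)]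
  have h1 : v / 10 / (10 ^ k) = v / (10 ^ (k + 1)) := by
    rw [Int.ediv_ediv_of_nonneg (by norm_num)]; ring_nf
  rw [Int.emod_def, Int.emod_def, Int.emod_def, h1]
  ring

lemma loop_eq (l : Nat) (hl : 1 ≤ l) :
    ∀ (r : Nat) (fuel : Nat) (v nn nrn st : Int), r ≤ l + l / 2 → r + 1 ≤ fuel → 0 ≤ st →
      cumpLoop fuel v ((l + l / 2 + 1 - r : Nat) : Int) nn nrn st (l : Int) =
        (nn + PySem.Int.mod v (10 ^ (r - l / 2)) * 10 ^ (l + l / 2 - r),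
         nrn + PySem.Int.mod (PySem.Int.floordiv v (10 ^ (r - l))) (10 ^ (min r l)) * 10 ^ st.toNat) := by
  intro r
  induction r with
  | zero =>
    intro fuel v nn nrn st hr hf hst
    obtain ⟨f, rfl⟩ : ∃ f, fuel = f + 1 := ⟨fuel - 1, by omega⟩
    rw [show ((0:Nat) - l / 2) = 0 from by omega, show ((0:Nat) - l) = 0 from by omega,
        show min 0 l = 0 from by omega]
    simp only [pow_zero, pymod_one, zero_mul, add_zero]
    by_cases hc : ((l + l / 2 + 1 - 0 : Nat) : Int) = (l : Int) * 2
    · simp only [cumpLoop, if_pos hc]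
    · simp only [cumpLoop, if_neg hc]
      rw [if_neg (show ¬((l + l / 2 + 1 - 0 : Nat) : Int) ≤ (l : Int) from by omega),
          if_neg (show ¬2 * ((l + l / 2 + 1 - 0 : Nat) : Int) ≤ (l : Int) from by omega),
          if_neg (show ¬((l : Int) < 2 * ((l + l / 2 + 1 - 0 : Nat) : Int) ∧
            2 * ((l + l / 2 + 1 - 0 : Nat) : Int) ≤ 3 * (l : Int)) from by omega)]
  | succ r ih =>
    intro fuel v nn nrn st hr hf hst
    obtain ⟨f, rfl⟩ : ∃ f, fuel = f + 1 := ⟨fuel - 1, by omega⟩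
    have hne : ¬((l + l / 2 + 1 - (r + 1) : Nat) : Int) = (l : Int) * 2 := by omega
    have hiter1 : (((l + l / 2 + 1 - (r + 1) : Nat) : Int) + 1) = ((l + l / 2 + 1 - r : Nat) : Int) := by omega
    have hexp : ((((l + l / 2 + 1 - (r + 1) : Nat) : Int)) - 1).toNat = l + l / 2 - (r + 1) := by omega
    simp only [cumpLoop, if_neg hne]
    by_cases hp1 : 2 * ((l + l / 2 + 1 - (r + 1) : Nat) : Int) ≤ (l : Int)
    · -- phase 1 (here l ≤ r)
      have hrl : l ≤ r := by omega
      rw [if_pos hp1, if_pos (show ((l + l / 2 + 1 - (r + 1) : Nat) : Int) ≤ (l : Int) from by omega),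
          hexp, hiter1, ih f _ _ _ _ (by omega) (by omega) hst]
      rw [Prod.mk.injEq]
      constructor
      · rw [show (r + 1 - l / 2) = (r - l / 2) + 1 from by omega, ← pymod_digit v (r - l / 2),
            show (l + l / 2 - r) = (l + l / 2 - (r + 1)) + 1 from by omega, pow_succ]
        ring
      · rw [pyfdiv_pyfdiv, show (r - l) + 1 = (r + 1 - l) from by omega,
            show min r l = l from by omega, show min (r + 1) l = l from by omega]
    · -- phase 2 (here r < l)
      have hrl : r < l := by omega
      rw [if_neg hp1, if_pos (show ((l : Int) < 2 * ((l + l / 2 + 1 - (r + 1) : Nat) : Int) ∧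
            2 * ((l + l / 2 + 1 - (r + 1) : Nat) : Int) ≤ 3 * (l : Int)) from by omega)]
      by_cases hmid : ((l + l / 2 + 1 - (r + 1) : Nat) : Int) ≤ (l : Int)
      · -- still accumulating nextNumb (l/2 ≤ r)
        rw [if_pos hmid, hexp, hiter1, ih f _ _ _ _ (by omega) (by omega) (by omega)]
        rw [Prod.mk.injEq]
        constructor
        · rw [show (r + 1 - l / 2) = (r - l / 2) + 1 from by omega, ← pymod_digit v (r - l / 2),
              show (l + l / 2 - r) = (l + l / 2 - (r + 1)) + 1 from by omega, pow_succ]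
          ring
        · rw [show (r - l) = 0 from by omega, show (r + 1 - l) = 0 from by omega, pow_zero,
              pyfdiv_one, pyfdiv_one, show min r l = r from by omega,
              show min (r + 1) l = r + 1 from by omega,
              show (st + 1).toNat = st.toNat + 1 from by omega, ← pymod_digit v r, pow_succ]
          ring
      · -- iter > l : nextNumb unchanged (r < l/2)
        rw [if_neg hmid, hiter1, ih f _ _ _ _ (by omega) (by omega) (by omega)]
        rw [Prod.mk.injEq]
        constructor
        · rw [show (r + 1 - l / 2) = 0 from by omega, show (r - l / 2) = 0 from by omega]
          simp
        · rw [show (r - l) = 0 from by omega, show (r + 1 - l) = 0 from by omega, pow_zero,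
              pyfdiv_one, pyfdiv_one, show min r l = r from by omega,
              show min (r + 1) l = r + 1 from by omega,
              show (st + 1).toNat = st.toNat + 1 from by omega, ← pymod_digit v r, pow_succ]
          ring

-- ===== VERDICT (by name: the statement is the Claim_ definition above) =====
theorem cump_NumbIn_spec : Claim_equal_cump_NumbIn := by
  intro numb leng _
  show cump_NumbIn numb leng = cump_NumbIn_alt numb leng
  by_cases hneg : leng ≤ 0
  · unfold cump_NumbIn cump_NumbIn_alt
    rw [show (leng * 2).toNat = 0 from by omega, if_pos hneg]
    simp only [cumpLoop]
    rw [if_neg (show ¬(1 : Int) = leng * 2 from by omega),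
        if_neg (show ¬(1 : Int) ≤ leng from by omega),
        if_neg (show ¬2 * (1 : Int) ≤ leng from by omega),
        if_neg (show ¬(leng < 2 * (1 : Int) ∧ 2 * (1 : Int) ≤ 3 * leng) from by omega)]
  · obtain ⟨l, rfl⟩ : ∃ l : Nat, leng = (l : Int) := ⟨leng.toNat, by omega⟩
    have hl : 1 ≤ l := by omega
    unfold cump_NumbIn cump_NumbIn_alt
    rw [if_neg hneg, show ((l : Int) * 2).toNat = 2 * l from by omega]
    have h1 := loop_eq l hl (l + l / 2) (2 * l + 1) numb 0 0 0 (by omega) (by omega) le_rfl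
    rw [show ((l + l / 2 + 1 - (l + l / 2) : Nat) : Int) = 1 from by omega] at h1
    rw [h1, show (l + l / 2 - (l + l / 2)) = 0 from by omega,
        show (l + l / 2 - l / 2) = l from by omega, show (l + l / 2 - l) = l / 2 from by omega,
        show min (l + l / 2) l = l from by omega]
    have hhalf : (PySem.Int.floordiv (l : Int) 2).toNat = l / 2 := by
      rw [PySem.Int.floordiv_eq_ediv_of_pos (by norm_num)]; omega
    have htn : ((l : Int)).toNat = l := by omega
    rw [hhalf, htn]
    simp only [pow_zero, mul_one, zero_add, Int.toNat_zero]
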